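-- pv_equiv track=rewrite | github.com/StarsExpress/UChicago-Supplement | utils/renamers.py | rename_pass_block_columns
-- ===== SOURCE A (Python) =====
-- def rename_pass_block_columns(columns: list[str]) -> list[str]:
--     renamed_cols = []
--     for column in columns:
--         split_text = column.split("_")
--         renamed_col = " ".join(text.capitalize() for text in split_text)
--
--         if "Team Name" in renamed_col:
--             renamed_col = renamed_col.replace(" Name", "")
--
--         if "Player Game Count" in renamed_col:
--             renamed_col = renamed_col.replace("Player Game Count", "Games")
--
--         if " Allowed" in renamed_col:
--             renamed_col = renamed_col.replace(" Allowed", "")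
--
--         if "Pbe" in renamed_col:
--             renamed_col = renamed_col.replace("Pbe", "PBE")
--
--         if "Snap Counts Pass Block" in renamed_col:
--             renamed_col = renamed_col.replace("Snap Counts Pass Block", "All PB Snaps")
--
--         if "Non Spike Pass Block" in renamed_col:
--             renamed_col = renamed_col.replace(
--                 "Non Spike Pass Block", "Non Spike PB Snaps"
--             )
--
--         renamed_cols.append(renamed_col.replace("True Pass Set", "TPS"))
--     return renamed_cols
-- ===== SOURCE B (Python) =====
-- # Staged whole-list passes instead of a per-column if/replace chain: title-case
-- # everything with a one-pass state machine, then apply each substitution as an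
-- # unconditional pass over the whole list (str.replace is already the identity
-- # when the pattern is absent, so six of A's guards are redundant; only the
-- # "Team Name" rule needs a guard because it replaces a different string).
--
-- def _titled(column):
--     out = []
--     start = True
--     for ch in column:
--         if ch == "_":
--             out.append(" ")
--             start = True
--         else:
--             out.append(ch.upper() if start else ch.lower())
--             start = False
--     return "".join(out)
--
--
-- def _drop_team_name(s):
--     return s.replace(" Name", "") if "Team Name" in s else s
--
--
-- def rename_pass_block_columns(columns):
--     cols = [_titled(c) for c in columns]
--     cols = [_drop_team_name(s) for s in cols]
--     cols = [s.replace("Player Game Count", "Games") for s in cols]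
--     cols = [s.replace(" Allowed", "") for s in cols]
--     cols = [s.replace("Pbe", "PBE") for s in cols]
--     cols = [s.replace("Snap Counts Pass Block", "All PB Snaps") for s in cols]
--     cols = [s.replace("Non Spike Pass Block", "Non Spike PB Snaps") for s in cols]
--     return [s.replace("True Pass Set", "TPS") for s in cols]
-- ===== Notes on version B (the rewrite author's own statement) =====
-- stated objective: simpler
-- what changed: B replaces A's per-column loop of guarded if/replace statements by staged whole-list passes: a one-pass title-casing state machine (instead of split/capitalize/join) followed by one unconditional replace pass per rule, dropping the six guards that are redundant because str.replace is the identity when the pattern is absent (only the 'Team Name' rule, which replaces a different string than it tests, keeps its guard).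
import Mathlib
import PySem

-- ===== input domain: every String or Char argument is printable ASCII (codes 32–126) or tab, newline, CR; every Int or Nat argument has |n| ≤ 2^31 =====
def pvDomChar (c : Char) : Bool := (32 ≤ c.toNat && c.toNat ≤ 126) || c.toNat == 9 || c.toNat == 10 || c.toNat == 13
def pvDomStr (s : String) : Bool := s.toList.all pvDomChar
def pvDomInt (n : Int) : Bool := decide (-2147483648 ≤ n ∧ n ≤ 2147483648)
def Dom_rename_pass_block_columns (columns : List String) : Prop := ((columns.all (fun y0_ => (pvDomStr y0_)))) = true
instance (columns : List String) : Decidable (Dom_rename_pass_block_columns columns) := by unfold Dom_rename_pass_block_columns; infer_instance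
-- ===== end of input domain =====

-- B restructures A into staged whole-list passes: a one-pass title-casing state machine,
-- then one unconditional replace pass per rule (six of A's guards are redundant since
-- replace is the identity when the pattern is absent); objective: simpler.

-- ===== PORT A =====
-- str.capitalize(): first char uppercased, rest lowered (exact on the ASCII domain)
def pvCap (cs : List Char) : List Char :=
  match cs with
  | [] => []
  | c :: rest => PySem.Chars.upperChar c :: rest.map PySem.Chars.lowerChar

def pvRenameColA (column : String) : String :=
  let split_text := PySem.Chars.splitOn column.toList ['_']
  let r0 := PySem.Chars.join [' '] (split_text.map pvCap)
  let r1 := if PySem.Chars.isIn "Team Name".toList r0 then PySem.Chars.replace r0 " Name".toList [] else r0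
  let r2 := if PySem.Chars.isIn "Player Game Count".toList r1 then PySem.Chars.replace r1 "Player Game Count".toList "Games".toList else r1
  let r3 := if PySem.Chars.isIn " Allowed".toList r2 then PySem.Chars.replace r2 " Allowed".toList [] else r2
  let r4 := if PySem.Chars.isIn "Pbe".toList r3 then PySem.Chars.replace r3 "Pbe".toList "PBE".toList else r3
  let r5 := if PySem.Chars.isIn "Snap Counts Pass Block".toList r4 then PySem.Chars.replace r4 "Snap Counts Pass Block".toList "All PB Snaps".toList else r4
  let r6 := if PySem.Chars.isIn "Non Spike Pass Block".toList r5 then PySem.Chars.replace r5 "Non Spike Pass Block".toList "Non Spike PB Snaps".toList else r5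
  String.ofList (PySem.Chars.replace r6 "True Pass Set".toList "TPS".toList)

def rename_pass_block_columns (columns : List String) : List String :=
  columns.foldl (fun renamed_cols column => renamed_cols ++ [pvRenameColA column]) []

-- ===== PORT B =====
-- _titled: one pass over the characters with a 'start of word' flag
def pvTitleWalk : List Char → Bool → List Char
  | [], _ => []
  | c :: rest, start =>
    if c = '_' then ' ' :: pvTitleWalk rest true
    else (if start then PySem.Chars.upperChar c else PySem.Chars.lowerChar c) :: pvTitleWalk rest false

def pvTitled (column : String) : String :=
  String.ofList (pvTitleWalk column.toList true)

-- _drop_team_name: the one rule whose guard tests a different string than it replaces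
def pvDropTeamName (s : String) : String :=
  if PySem.Chars.isIn "Team Name".toList s.toList
  then String.ofList (PySem.Chars.replace s.toList " Name".toList []) else s

-- s.replace(find, repl) as a whole-list pass
def pvSub (find repl : List Char) (s : String) : String :=
  String.ofList (PySem.Chars.replace s.toList find repl)

def rename_pass_block_columns_alt (columns : List String) : List String :=
  let c0 := columns.map pvTitled
  let c1 := c0.map pvDropTeamName
  let c2 := c1.map (pvSub "Player Game Count".toList "Games".toList)
  let c3 := c2.map (pvSub " Allowed".toList [])
  let c4 := c3.map (pvSub "Pbe".toList "PBE".toList)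
  let c5 := c4.map (pvSub "Snap Counts Pass Block".toList "All PB Snaps".toList)
  let c6 := c5.map (pvSub "Non Spike Pass Block".toList "Non Spike PB Snaps".toList)
  c6.map (pvSub "True Pass Set".toList "TPS".toList)

-- ===== PRECONDITION & SPEC =====
def Spec_rename_pass_block_columns (columns : List String) (out : List String) : Prop := out = rename_pass_block_columns_alt columns
instance (columns : List String) (out : List String) : Decidable (Spec_rename_pass_block_columns columns out) := by unfold Spec_rename_pass_block_columns; infer_instance

-- ===== CLAIM (what is proved, stated in full; the proofs are below) =====
def Claim_equal_rename_pass_block_columns : Prop := ∀ (columns : List String), Dom_rename_pass_block_columns columns → Spec_rename_pass_block_columns columns (rename_pass_block_columns columns)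

-- ===== LEMMAS AND PROOFS =====
-- replace is the identity when the pattern does not occur
theorem pv_replace_go_id (old new : List Char) :
    ∀ (fuel : Nat) (l acc : List Char), ¬ old <:+: l →
      PySem.Chars.replace.go old new fuel l acc = acc.reverse ++ l := by
  intro fuel
  induction fuel with
  | zero => intro l acc _; rfl
  | succ f ih =>
    intro l acc h
    cases l with
    | nil => simp [PySem.Chars.replace.go]
    | cons c t =>
      rw [PySem.Chars.replace.go]
      rw [if_neg (by
        intro hp
        exact h ((List.isPrefixOf_iff_prefix.mp hp).isInfix))]
      rw [ih t (c :: acc) (fun ht => h (List.infix_cons ht))]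
      simp

theorem pv_replace_of_not_isIn (s old new : List Char)
    (h : PySem.Chars.isIn old s = false) :
    PySem.Chars.replace s old new = s := by
  have hinf : ¬ old <:+: s := (PySem.Chars.isIn_eq_false_iff old s).mp h
  have hne : old ≠ [] := by
    intro he; subst he; exact hinf List.nil_infix
  unfold PySem.Chars.replace
  rw [if_neg (by simpa [List.isEmpty_iff] using hne)]
  simpa using pv_replace_go_id old new s.length s [] hinf

-- pvSub / pvDropTeamName on an explicit ofList, as A's guarded steps
theorem pv_sub_ofList (find repl s : List Char) :
    pvSub find repl (String.ofList s)
      = String.ofList (if PySem.Chars.isIn find s then PySem.Chars.replace s find repl else s) := by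
  unfold pvSub
  simp only [String.toList_ofList]
  by_cases h : PySem.Chars.isIn find s = true
  · rw [if_pos h]
  · rw [if_neg h, pv_replace_of_not_isIn s find repl (by simpa using h)]

theorem pv_drop_ofList (s : List Char) :
    pvDropTeamName (String.ofList s)
      = String.ofList (if PySem.Chars.isIn "Team Name".toList s
                       then PySem.Chars.replace s " Name".toList [] else s) := by
  unfold pvDropTeamName
  simp only [String.toList_ofList]
  split <;> rfl

-- structural characterisation of Python's split on "_"
def pvSplitU : List Char → List (List Char)
  | [] => [[]]
  | c :: rest =>
    if c = '_' then [] :: pvSplitU rest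
    else match pvSplitU rest with
      | [] => [[c]]
      | p :: ps => (c :: p) :: ps

def pvConsHead (x : List Char) : List (List Char) → List (List Char)
  | [] => [x]
  | p :: ps => (x ++ p) :: ps

theorem pvSplitU_ne_nil (cs : List Char) : pvSplitU cs ≠ [] := by
  induction cs with
  | nil => simp [pvSplitU]
  | cons c rest ih =>
    unfold pvSplitU
    split
    · simp
    · cases h : pvSplitU rest <;> simp

theorem pv_go_eq (fuel : Nat) : ∀ (l cur : List Char) (acc : List (List Char)), l.length ≤ fuel →
    PySem.Chars.splitOn.go ['_'] fuel l cur acc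
      = acc.reverse ++ pvConsHead cur.reverse (pvSplitU l) := by
  induction fuel with
  | zero =>
    intro l cur acc h
    have : l = [] := List.eq_nil_of_length_eq_zero (Nat.le_zero.mp h)
    subst this
    simp [PySem.Chars.splitOn.go, pvSplitU, pvConsHead]
  | succ f ih =>
    intro l cur acc h
    cases l with
    | nil => simp [PySem.Chars.splitOn.go, pvSplitU, pvConsHead]
    | cons c rest =>
      rw [PySem.Chars.splitOn.go]
      by_cases hc : c = '_'
      · subst hc
        simp only [List.isPrefixOf_cons₂]
        rw [if_pos (by simp)]
        simp only [List.length_cons] at h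
        rw [ih _ _ _ (by simpa using h)]
        simp [pvSplitU]
        cases hs : pvSplitU rest with
        | nil => exact absurd hs (pvSplitU_ne_nil rest)
        | cons p ps => simp [pvConsHead]
      · rw [if_neg (by simp [List.isPrefixOf]; exact fun h => hc h.symm)]
        rw [ih _ _ _ (by simpa using Nat.le_of_succ_le_succ (by simpa using h))]
        simp only [pvSplitU]
        rw [if_neg hc]
        cases hs : pvSplitU rest with
        | nil => exact absurd hs (pvSplitU_ne_nil rest)
        | cons p ps => simp [pvConsHead]

theorem pv_splitOn_underscore (cs : List Char) :
    PySem.Chars.splitOn cs ['_'] = pvSplitU cs := by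
  unfold PySem.Chars.splitOn
  rw [pv_go_eq _ _ _ _ (Nat.le_succ _)]
  cases hs : pvSplitU cs with
  | nil => exact absurd hs (pvSplitU_ne_nil cs)
  | cons p ps => simp [pvConsHead]

def pvFlat (ps : List (List Char)) : List Char := ps.flatMap (fun p => ' ' :: pvCap p)

theorem pv_walk_eq (cs : List Char) : ∀ (b : Bool),
    pvTitleWalk cs b
      = (if b then pvCap ((pvSplitU cs).headI)
         else ((pvSplitU cs).headI).map PySem.Chars.lowerChar) ++ pvFlat ((pvSplitU cs).tail) := by
  induction cs with
  | nil => intro b; cases b <;> simp [pvTitleWalk, pvSplitU, pvCap, pvFlat]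
  | cons c rest ih =>
    intro b
    by_cases hc : c = '_'
    · subst hc
      simp only [pvTitleWalk, pvSplitU]
      rw [ih true]
      cases hs : pvSplitU rest with
      | nil => exact absurd hs (pvSplitU_ne_nil rest)
      | cons p ps =>
        cases b <;> simp [pvFlat, pvCap]
    · simp only [pvTitleWalk, if_neg hc, pvSplitU]
      rw [ih false]
      cases hs : pvSplitU rest with
      | nil => exact absurd hs (pvSplitU_ne_nil rest)
      | cons p ps =>
        cases b <;> simp [pvFlat, pvCap]

theorem pv_join_eq (p : List Char) (qs : List (List Char)) :
    PySem.Chars.join [' '] ((p :: qs).map pvCap) = pvCap p ++ pvFlat qs := by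
  induction qs generalizing p with
  | nil => simp [PySem.Chars.join, pvFlat, List.intercalate]
  | cons q qs ih =>
    have step : [' '].intercalate (pvCap p :: pvCap q :: qs.map pvCap)
        = pvCap p ++ ' ' :: [' '].intercalate (pvCap q :: qs.map pvCap) := by
      simp [List.intercalate]
    simp only [PySem.Chars.join, List.map_cons] at *
    rw [step, ih q]
    simp [pvFlat]

theorem pv_title_eq (cs : List Char) :
    pvTitleWalk cs true = PySem.Chars.join [' '] ((PySem.Chars.splitOn cs ['_']).map pvCap) := by
  rw [pv_splitOn_underscore, pv_walk_eq]
  cases hs : pvSplitU cs with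
  | nil => exact absurd hs (pvSplitU_ne_nil cs)
  | cons p ps => rw [pv_join_eq]; simp

theorem pv_cond_replace (find repl s : List Char) :
    (if PySem.Chars.isIn find s then PySem.Chars.replace s find repl else s)
      = PySem.Chars.replace s find repl := by
  by_cases h : PySem.Chars.isIn find s = true
  · rw [if_pos h]
  · rw [if_neg h, pv_replace_of_not_isIn s find repl (by simpa using h)]

-- per-column: B's staged pipeline equals A's guarded chain
theorem pv_col_eq (column : String) :
    pvSub "True Pass Set".toList "TPS".toList
      (pvSub "Non Spike Pass Block".toList "Non Spike PB Snaps".toList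
        (pvSub "Snap Counts Pass Block".toList "All PB Snaps".toList
          (pvSub "Pbe".toList "PBE".toList
            (pvSub " Allowed".toList []
              (pvSub "Player Game Count".toList "Games".toList
                (pvDropTeamName (pvTitled column)))))))
      = pvRenameColA column := by
  simp only [pvTitled, pv_drop_ofList, pv_sub_ofList, pvRenameColA]
  rw [← pv_title_eq, pv_cond_replace]

-- ===== VERDICT (by name: the statement is the Claim_ definition above) =====
theorem rename_pass_block_columns_spec : Claim_equal_rename_pass_block_columns := by
  intro columns _
  unfold Spec_rename_pass_block_columns rename_pass_block_columns rename_pass_block_columns_alt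
  rw [PySem.List.foldl_append_singleton_eq_map]
  simp only [List.map_map]
  exact (List.map_congr_left (fun c _ => (pv_col_eq c).symm))
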